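-- pv_equiv track=rewrite | github.com/skripnn/TicTacToe_web | game/players.py | make_wins
-- ===== SOURCE A (Python) =====
-- def make_wins(size):  # create list with win combinations
--     wins_xy = []
--     for x in range(size):
--         wins_xy.append([])
--         for y in range(size):
--             wins_xy[x].append([x, y])
--
--     wins_yx = []
--     for y in range(size):
--         wins_yx.append([])
--         for x in range(size):
--             wins_yx[y].append([x, y])
--
--     wins_d = [[], []]
--     for x, y in enumerate(reversed(range(size))):
--         wins_d[0].append([x, x])
--         wins_d[1].append([x, y])
--
--     wins = wins_xy + wins_yx + wins_d
--     return wins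
-- ===== SOURCE B (Python) =====
-- def make_wins(size):  # parametrize every win line as start + t*direction, one generator for all lines
--     lines = [((x, 0), (0, 1)) for x in range(size)] \
--           + [((0, y), (1, 0)) for y in range(size)] \
--           + [((0, 0), (1, 1)), ((0, size - 1), (1, -1))]
--     return [[[sx + t * dx, sy + t * dy] for t in range(size)]
--             for (sx, sy), (dx, dy) in lines]
-- ===== Notes on version B (the rewrite author's own statement) =====
-- stated objective: alternative
-- what changed: B replaces A's four separate line-specific loops with one uniform generator: it first lists every win line as a (start, direction) pair and then produces each line's cells by the single affine formula start + t*direction, so rows, columns and both diagonals all come from the same code path.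
import Mathlib
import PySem

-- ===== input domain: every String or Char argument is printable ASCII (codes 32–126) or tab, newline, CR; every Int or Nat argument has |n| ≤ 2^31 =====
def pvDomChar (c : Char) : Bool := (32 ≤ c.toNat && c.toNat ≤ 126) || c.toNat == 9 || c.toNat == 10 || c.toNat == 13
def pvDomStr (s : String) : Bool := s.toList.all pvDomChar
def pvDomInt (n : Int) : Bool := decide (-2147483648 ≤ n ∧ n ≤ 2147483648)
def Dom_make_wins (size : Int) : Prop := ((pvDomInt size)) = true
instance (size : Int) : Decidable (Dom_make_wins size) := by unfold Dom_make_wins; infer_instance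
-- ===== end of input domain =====

-- B lists every win line as (start, direction) and emits its cells by one affine formula start + t*direction,
-- replacing A's four line-specific loops with a single uniform generator; same O(n^2) cost, different algorithm shape.

-- ===== PORT A =====
def make_wins (size : Int) : List (List (List Int)) :=
  -- wins_xy: append an empty row, then append [x, y] to it for each y
  let wins_xy := (PySem.List.pyRange 0 size 1).foldl
    (fun acc x => acc ++ [(PySem.List.pyRange 0 size 1).foldl (fun row y => row ++ [[x, y]]) []]) []
  let wins_yx := (PySem.List.pyRange 0 size 1).foldl
    (fun acc y => acc ++ [(PySem.List.pyRange 0 size 1).foldl (fun row x => row ++ [[x, y]]) []]) []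
  -- for x, y in enumerate(reversed(range(size))): wins_d[0].append([x,x]); wins_d[1].append([x,y])
  let wins_d := (PySem.List.enumerate ((PySem.List.pyRange 0 size 1).reverse) 0).foldl
    (fun (d : List (List Int) × List (List Int)) xy =>
      (d.1 ++ [[xy.1, xy.1]], d.2 ++ [[xy.1, xy.2]])) ([], [])
  wins_xy ++ wins_yx ++ [wins_d.1, wins_d.2]

-- ===== PORT B =====
def make_wins_alt (size : Int) : List (List (List Int)) :=
  let lines : List ((Int × Int) × (Int × Int)) :=
    (PySem.List.pyRange 0 size 1).map (fun x => ((x, 0), (0, 1)))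
    ++ (PySem.List.pyRange 0 size 1).map (fun y => ((0, y), (1, 0)))
    ++ [((0, 0), (1, 1)), ((0, size - 1), (1, -1))]
  lines.map (fun l =>
    (PySem.List.pyRange 0 size 1).map (fun t => [l.1.1 + t * l.2.1, l.1.2 + t * l.2.2]))

-- ===== PRECONDITION & SPEC =====
def Spec_make_wins (size : Int) (out : List (List (List Int))) : Prop := out = make_wins_alt size
instance (size : Int) (out : List (List (List Int))) : Decidable (Spec_make_wins size out) := by unfold Spec_make_wins; infer_instance

-- ===== CLAIM (what is proved, stated in full; the proofs are below) =====
def Claim_equal_make_wins : Prop := ∀ (size : Int), Dom_make_wins size → Spec_make_wins size (make_wins size)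

-- ===== LEMMAS AND PROOFS =====

-- enumerate(reversed(range(size))) lists the pairs (j, size-1-j) for j in range(size)
theorem enum_rev (size : Int) :
    PySem.List.enumerate ((PySem.List.pyRange 0 size 1).reverse) 0
      = (PySem.List.pyRange 0 size 1).map (fun j => (j, size - 1 - j)) := by
  apply List.ext_getElem
  · simp [PySem.List.length_enumerate, PySem.List.length_pyRange_one]
  · intro k h1 h2
    simp only [PySem.List.length_enumerate, List.length_reverse, PySem.List.length_pyRange_one] at h1
    rw [PySem.List.getElem_enumerate]
    rw [List.getElem_reverse, List.getElem_map]
    rw [PySem.List.getElem_pyRange_one, PySem.List.getElem_pyRange_one]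
    simp only [PySem.List.length_pyRange_one, Prod.mk.injEq, true_and]
    omega

theorem make_wins_eq (size : Int) : make_wins size = make_wins_alt size := by
  unfold make_wins make_wins_alt
  simp only [PySem.List.foldl_append_singleton_eq_map, List.nil_append]
  rw [PySem.List.foldl_prod_mk
        (f := fun (s : List (List Int)) (e : Int × Int) => s ++ [[e.1, e.1]])
        (g := fun (s : List (List Int)) (e : Int × Int) => s ++ [[e.1, e.2]])]
  simp only [PySem.List.foldl_append_singleton_eq_map, List.nil_append, enum_rev,
    List.map_map, List.map_append, List.map_cons, List.map_nil, List.append_assoc]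
  simp only [Function.comp_def]
  simp [mul_zero, add_zero, zero_add, mul_one, mul_neg, sub_eq_add_neg]

-- ===== VERDICT (by name: the statement is the Claim_ definition above) =====
theorem make_wins_spec : Claim_equal_make_wins := by
  intro size _
  exact make_wins_eq size
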